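-- pv_equiv track=rewrite | github.com/harikrish0980/atlas-ingest | atlas/dedupe/simhash.py | dedupe_near_simhash
-- ===== SOURCE A (Python) =====
-- from typing import Iterable, List
--
-- def hamming_distance64(a: int, b: int) -> int:
--     return (a ^ b).bit_count()
--
-- def dedupe_near_simhash(
--     simhashes: List[int],
--     threshold: int = 3,
-- ) -> List[bool]:
--     """
--     Given simhash list, return keep_mask (True=keep, False=drop).
--     O(n^2) – fine for demo sizes. For huge scale you’d do bucketing/LSH.
--     """
--     keep = [True] * len(simhashes)
--     for i in range(len(simhashes)):
--         if not keep[i]: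
--             continue
--         for j in range(i + 1, len(simhashes)):
--             if not keep[j]:
--                 continue
--             if hamming_distance64(simhashes[i], simhashes[j]) <= threshold:
--                 keep[j] = False
--     return keep
-- ===== SOURCE B (Python) =====
-- def dedupe_near_simhash(simhashes, threshold=3):
--     # One forward pass: an item is kept iff no previously-kept hash is within
--     # the threshold; the mask is built by appending, nothing is mutated in place.
--     kept = []
--     mask = []
--     for h in simhashes:
--         if any(((h ^ k).bit_count() <= threshold) for k in kept):
--             mask.append(False)
--         else:
--             kept.append(h)
--             mask.append(True)
--     return mask
-- ===== Notes on version B (the rewrite author's own statement) =====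
-- stated objective: alternative
-- what changed: Replaced A's nested index loops that mutate a keep-mask in place by a single forward pass that appends to the mask and compares each hash only against the list of hashes kept so far.
import Mathlib
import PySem

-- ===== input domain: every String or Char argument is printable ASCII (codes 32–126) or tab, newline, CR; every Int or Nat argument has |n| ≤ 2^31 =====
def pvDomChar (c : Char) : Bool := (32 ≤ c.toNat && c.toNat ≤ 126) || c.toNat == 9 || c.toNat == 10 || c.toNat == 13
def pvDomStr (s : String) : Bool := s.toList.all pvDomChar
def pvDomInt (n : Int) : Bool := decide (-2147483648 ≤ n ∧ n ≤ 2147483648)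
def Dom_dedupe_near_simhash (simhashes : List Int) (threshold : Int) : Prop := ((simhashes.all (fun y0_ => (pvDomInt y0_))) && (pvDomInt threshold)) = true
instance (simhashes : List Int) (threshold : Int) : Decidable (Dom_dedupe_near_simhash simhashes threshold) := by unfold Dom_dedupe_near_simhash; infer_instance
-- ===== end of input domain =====

-- B replaces A's nested index loops over a mutable mask by a single forward pass
-- that compares each hash only against the hashes kept so far (objective: alternative).

-- ===== PORT A =====
def hamming_distance64 (a b : Int) : Int :=
  (PySem.Int.bitCount (PySem.Int.bxor a b) : Int)

def dedupe_near_simhash (simhashes : List Int) (threshold : Int) : List Bool :=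
  let keep0 := List.replicate simhashes.length true
  (PySem.List.pyRange 0 (simhashes.length : Int) 1).foldl (fun keep i =>
    if !(PySem.List.pyGetD keep i false) then keep
    else (PySem.List.pyRange (i + 1) (simhashes.length : Int) 1).foldl (fun keep j =>
      if !(PySem.List.pyGetD keep j false) then keep
      else if hamming_distance64 (PySem.List.pyGetD simhashes i 0)
                (PySem.List.pyGetD simhashes j 0) ≤ threshold
           then PySem.List.pySetD keep j false
           else keep) keep) keep0

-- ===== PORT B =====
def dedupe_near_simhash_alt (simhashes : List Int) (threshold : Int) : List Bool :=
  (simhashes.foldl (fun (st : List Int × List Bool) h =>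
      if st.1.any (fun k => (PySem.Int.bitCount (PySem.Int.bxor h k) : Int) ≤ threshold)
      then (st.1, st.2 ++ [false])
      else (st.1 ++ [h], st.2 ++ [true])) ([], [])).2

-- ===== PRECONDITION & SPEC =====
def Spec_dedupe_near_simhash (simhashes : List Int) (threshold : Int) (out : List Bool) : Prop := out = dedupe_near_simhash_alt simhashes threshold
instance (simhashes : List Int) (threshold : Int) (out : List Bool) : Decidable (Spec_dedupe_near_simhash simhashes threshold out) := by unfold Spec_dedupe_near_simhash; infer_instance

-- ===== CLAIM (what is proved, stated in full; the proofs are below) =====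
def Claim_equal_dedupe_near_simhash : Prop := ∀ (simhashes : List Int) (threshold : Int), Dom_dedupe_near_simhash simhashes threshold → Spec_dedupe_near_simhash simhashes threshold (dedupe_near_simhash simhashes threshold)

-- ===== LEMMAS AND PROOFS =====

/-- `h` is within `t` Hamming distance of `k`. -/
def pvClose (t h k : Int) : Bool :=
  (PySem.Int.bitCount (PySem.Int.bxor h k) : Int) ≤ t

/-- Reference greedy recursion: mask of `ys` given already-kept hashes `K`. -/
def pvRef (t : Int) (K : List Int) : List Int → List Bool
  | [] => []
  | h :: hs =>
      if K.any (fun k => pvClose t h k) then false :: pvRef t K hs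
      else true :: pvRef t (K ++ [h]) hs

lemma pvGetD_append_self {α : Type} (m1 l : List α) (d : α) :
    PySem.List.pyGetD (m1 ++ l) (m1.length : Int) d = l.getD 0 d := by
  simp [PySem.List.pyGetD_natCast, List.getD, List.getElem?_append_right (Nat.le_refl _)]

lemma pvSetD_append_self {α : Type} (m1 l : List α) (v : α) :
    PySem.List.pySetD (m1 ++ l) (m1.length : Int) v = m1 ++ l.set 0 v := by
  simp [PySem.List.pySetD_natCast]

lemma pvAltFold (t : Int) : ∀ (ys : List Int) (K : List Int) (m : List Bool),
    (ys.foldl (fun (st : List Int × List Bool) h =>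
        if st.1.any (fun k => (PySem.Int.bitCount (PySem.Int.bxor h k) : Int) ≤ t)
        then (st.1, st.2 ++ [false])
        else (st.1 ++ [h], st.2 ++ [true])) (K, m)).2
      = m ++ pvRef t K ys := by
  intro ys
  induction ys with
  | nil => intro K m; simp [pvRef]
  | cons h hs ih =>
      intro K m
      rw [List.foldl_cons]
      by_cases hc : (K.any (fun k => (PySem.Int.bitCount (PySem.Int.bxor h k) : Int) ≤ t)) = true
      · rw [if_pos hc, ih]
        have h2 : K.any (fun k => pvClose t h k) = true := hc
        simp [pvRef, h2]
      · rw [if_neg hc, ih]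
        have h2 : K.any (fun k => pvClose t h k) = false := Bool.eq_false_iff.mpr hc
        simp [pvRef, h2]

lemma pvInner (t hv : Int) : ∀ (zs ps : List Int) (m1 : List Bool) (g : Int → Bool),
    m1.length = ps.length →
    (PySem.List.pyRange (ps.length : Int) (((ps ++ zs).length : Nat) : Int) 1).foldl
      (fun keep j =>
        if !(PySem.List.pyGetD keep j false) then keep
        else if hamming_distance64 hv (PySem.List.pyGetD (ps ++ zs) j 0) ≤ t
             then PySem.List.pySetD keep j false
             else keep)
      (m1 ++ zs.map g)
    = m1 ++ zs.map (fun z => g z && !(hamming_distance64 hv z ≤ t : Bool)) := by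
  intro zs
  induction zs with
  | nil =>
      intro ps m1 g hlen
      rw [PySem.List.pyRange_one_eq_nil (by simp)]
      simp
  | cons z zs ih =>
      intro ps m1 g hlen
      rw [PySem.List.pyRange_one_cons (by simp only [List.length_append, List.length_cons]; push_cast; omega)]
      rw [List.foldl_cons]
      have hget : PySem.List.pyGetD (m1 ++ (z :: zs).map g) (ps.length : Int) false = g z := by
        rw [← hlen, pvGetD_append_self]; rfl
      have hget2 : PySem.List.pyGetD (ps ++ z :: zs) (ps.length : Int) 0 = z := by
        rw [show (ps.length : Int) = (ps.length : Int) from rfl, pvGetD_append_self]; rfl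
      have hstep :
          (if !(PySem.List.pyGetD (m1 ++ (z :: zs).map g) (ps.length : Int) false)
             then m1 ++ (z :: zs).map g
             else if hamming_distance64 hv (PySem.List.pyGetD (ps ++ z :: zs) (ps.length : Int) 0) ≤ t
                  then PySem.List.pySetD (m1 ++ (z :: zs).map g) (ps.length : Int) false
                  else m1 ++ (z :: zs).map g)
          = (m1 ++ [g z && !(hamming_distance64 hv z ≤ t : Bool)]) ++ zs.map g := by
        rw [hget, hget2]
        cases hg : g z with
        | false => simp [hg]
        | true =>
            by_cases hd : hamming_distance64 hv z ≤ t
            · rw [if_neg (by simp), if_pos hd, ← hlen, pvSetD_append_self]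
              simp [hd, hg]
            · rw [if_neg (by simp), if_neg hd]
              simp [hd, hg]
      rw [hstep]
      have e1 : ps ++ z :: zs = (ps ++ [z]) ++ zs := by simp
      have e2 : (ps.length : Int) + 1 = ((ps ++ [z]).length : Int) := by simp
      rw [e1, e2]
      rw [ih (ps ++ [z]) (m1 ++ [g z && !(hamming_distance64 hv z ≤ t : Bool)]) g
          (by simp [hlen])]
      simp

lemma pvOuter (t : Int) : ∀ (ys ps : List Int) (K : List Int) (m0 : List Bool),
    m0.length = ps.length →
    (PySem.List.pyRange (ps.length : Int) (((ps ++ ys).length : Nat) : Int) 1).foldl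
      (fun keep i =>
        if !(PySem.List.pyGetD keep i false) then keep
        else (PySem.List.pyRange (i + 1) (((ps ++ ys).length : Nat) : Int) 1).foldl
          (fun keep j =>
            if !(PySem.List.pyGetD keep j false) then keep
            else if hamming_distance64 (PySem.List.pyGetD (ps ++ ys) i 0)
                      (PySem.List.pyGetD (ps ++ ys) j 0) ≤ t
                 then PySem.List.pySetD keep j false
                 else keep) keep)
      (m0 ++ ys.map (fun h => !K.any (fun k => pvClose t h k)))
    = m0 ++ pvRef t K ys := by
  intro ys
  induction ys with
  | nil =>
      intro ps K m0 hlen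
      rw [PySem.List.pyRange_one_eq_nil (by simp)]
      simp [pvRef]
  | cons h hs ih =>
      intro ps K m0 hlen
      rw [PySem.List.pyRange_one_cons (by simp only [List.length_append, List.length_cons]; push_cast; omega)]
      rw [List.foldl_cons]
      have hget : PySem.List.pyGetD (m0 ++ (h :: hs).map (fun h' => !K.any (fun k => pvClose t h' k)))
          (ps.length : Int) false = !K.any (fun k => pvClose t h k) := by
        rw [← hlen, pvGetD_append_self]; rfl
      have hget2 : PySem.List.pyGetD (ps ++ h :: hs) (ps.length : Int) 0 = h := by
        rw [pvGetD_append_self]; rfl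
      have e1 : ps ++ h :: hs = (ps ++ [h]) ++ hs := by simp
      have e2 : (ps.length : Int) + 1 = ((ps ++ [h]).length : Int) := by simp
      cases hc : K.any (fun k => pvClose t h k) with
      | true =>
          -- current entry is False: the outer body skips, K unchanged
          rw [if_pos (by rw [hget, hc]; rfl)]
          have hmask : m0 ++ (h :: hs).map (fun h' => !K.any (fun k => pvClose t h' k))
              = (m0 ++ [false]) ++ hs.map (fun h' => !K.any (fun k => pvClose t h' k)) := by
            simp [hc]
          rw [hmask, e1, e2,
            ih (ps ++ [h]) K (m0 ++ [false]) (by simp [hlen])]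
          simp [pvRef, hc]
      | false =>
          -- current entry is True: the inner pass clears later close entries
          rw [if_neg (by rw [hget, hc]; simp)]
          have hmask : m0 ++ (h :: hs).map (fun h' => !K.any (fun k => pvClose t h' k))
              = (m0 ++ [true]) ++ hs.map (fun h' => !K.any (fun k => pvClose t h' k)) := by
            simp [hc]
          rw [hget2, hmask, e1, e2,
            pvInner t h hs (ps ++ [h]) (m0 ++ [true])
              (fun h' => !K.any (fun k => pvClose t h' k)) (by simp [hlen])]
          have hmap : hs.map (fun z => (!K.any (fun k => pvClose t z k))
                && !(hamming_distance64 h z ≤ t : Bool))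
              = hs.map (fun h' => !(K ++ [h]).any (fun k => pvClose t h' k)) := by
            apply List.map_congr_left
            intro z _
            simp only [List.any_append, Bool.not_or, List.any_cons, List.any_nil, Bool.or_false,
              pvClose, hamming_distance64, PySem.Int.bxor_comm z h]
            norm_cast
          rw [show (m0 ++ [true]) ++ hs.map (fun z => (!K.any (fun k => pvClose t z k))
                && !(hamming_distance64 h z ≤ t : Bool))
              = (m0 ++ [true]) ++ hs.map (fun h' => !(K ++ [h]).any (fun k => pvClose t h' k))
            from by rw [hmap]]
          rw [ih (ps ++ [h]) (K ++ [h]) (m0 ++ [true]) (by simp [hlen])]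
          simp [pvRef, hc]

-- ===== VERDICT (by name: the statement is the Claim_ definition above) =====
theorem dedupe_near_simhash_spec : Claim_equal_dedupe_near_simhash := by
  intro xs t _
  unfold Spec_dedupe_near_simhash
  have hB : dedupe_near_simhash_alt xs t = pvRef t [] xs := by
    unfold dedupe_near_simhash_alt
    simpa using pvAltFold t xs [] []
  have hA : dedupe_near_simhash xs t = pvRef t [] xs := by
    unfold dedupe_near_simhash
    have := pvOuter t xs [] [] [] rfl
    simpa [List.map_const'] using this
  rw [hA, hB]
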